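-- pv_equiv track=rewrite | github.com/Aswinth-007/Projects | Flames/fl.py | calculate_flames
-- ===== SOURCE A (Python) =====
-- def calculate_flames(name1, name2):
--     name1 = name1.lower().replace(" ", "")
--     name2 = name2.lower().replace(" ", "")
--
--     for char in name1:
--         if char in name2:
--             name1 = name1.replace(char, "", 1)
--             name2 = name2.replace(char, "", 1)
--
--     combined_length = len(name1) + len(name2)
--     flames = ['Friends', 'Lovers', 'Affection', 'Marriage', 'Enemies', 'Siblings']
--
--     while len(flames) > 1:
--         index = (combined_length % len(flames)) - 1
--         if index >= 0:
--             flames = flames[index+1:] + flames[:index]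
--         else:
--             flames = flames[:len(flames)-1]
--
--     return flames[0]
-- ===== SOURCE B (Python) =====
-- def calculate_flames(name1, name2):
--     a = name1.lower().replace(" ", "")
--     b = name2.lower().replace(" ", "")
--     leftover = len(a) + len(b)
--     for c in set(a):
--         leftover -= 2 * min(a.count(c), b.count(c))
--     flames = ['Friends', 'Lovers', 'Affection', 'Marriage', 'Enemies', 'Siblings']
--     pos = 0
--     for n in range(2, 7):
--         pos = (pos + leftover) % n
--     return flames[pos]
-- ===== Notes on version B (the rewrite author's own statement) =====
-- stated objective: faster
-- what changed: The circular-elimination while-loop over the flames list (slicing/rotation) is replaced by the closed Josephus survivor recurrence pos=(pos+k)%n for n=2..6, and the pairwise char-removal loop (repeated str.replace rebuilds) is replaced by summing min(a.count(c), b.count(c)) over the distinct letters of the first name.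
import Mathlib
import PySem

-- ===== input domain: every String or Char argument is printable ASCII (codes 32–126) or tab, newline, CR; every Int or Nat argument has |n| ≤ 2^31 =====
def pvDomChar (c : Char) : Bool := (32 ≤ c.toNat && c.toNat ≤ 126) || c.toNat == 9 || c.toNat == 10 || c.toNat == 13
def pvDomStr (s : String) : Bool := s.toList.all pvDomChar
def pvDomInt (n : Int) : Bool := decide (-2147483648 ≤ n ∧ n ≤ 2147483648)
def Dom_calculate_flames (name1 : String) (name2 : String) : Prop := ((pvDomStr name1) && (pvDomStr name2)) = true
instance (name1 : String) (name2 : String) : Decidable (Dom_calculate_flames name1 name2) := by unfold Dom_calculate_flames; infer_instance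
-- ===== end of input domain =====

-- B replaces A's circular-elimination while-loop by the Josephus survivor recurrence and A's
-- pairwise char-removal loop (repeated str.replace rebuilds) by a min-of-counts sum over the
-- distinct letters of the first name (objective: faster; measured so in a timing run).

-- ===== PORT A =====
-- one iteration of A's while-loop body on the flames list
def flamesStep (k : Nat) (fl : List String) : List String :=
  let index : Int := ((k % fl.length : Nat) : Int) - 1
  if 0 ≤ index then
    PySem.List.slice fl (some (index + 1)) none ++ PySem.List.slice fl none (some index)
  else
    PySem.List.slice fl none (some ((fl.length : Int) - 1))

-- 'while len(flames) > 1'; each iteration shrinks the list by one, so fuel = initial length suffices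
def flamesLoop (k : Nat) : Nat → List String → List String
  | 0, fl => fl
  | fuel + 1, fl => if fl.length > 1 then flamesLoop k fuel (flamesStep k fl) else fl

def calculate_flames (name1 : String) (name2 : String) : String :=
  let n1 := PySem.Chars.replace (PySem.Chars.lower name1.toList) [' '] []
  let n2 := PySem.Chars.replace (PySem.Chars.lower name2.toList) [' '] []
  -- 'for char in name1' iterates over the string as it was BEFORE the body rebinds name1;
  -- s.replace(char, "", 1) for a single char removes the first occurrence (no-op if absent) = List.erase — exact
  let st := n1.foldl (fun (st : List Char × List Char) c =>
      if PySem.Chars.isIn [c] st.2 then (st.1.erase c, st.2.erase c) else st) (n1, n2)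
  let combined := st.1.length + st.2.length
  let flames := ["Friends", "Lovers", "Affection", "Marriage", "Enemies", "Siblings"]
  PySem.List.pyGetD (flamesLoop combined flames.length flames) 0 ""

-- ===== PORT B =====
def calculate_flames_alt (name1 : String) (name2 : String) : String :=
  let a := PySem.Chars.replace (PySem.Chars.lower name1.toList) [' '] []
  let b := PySem.Chars.replace (PySem.Chars.lower name2.toList) [' '] []
  -- 'for c in set(a): leftover -= 2*min(a.count(c), b.count(c))' — order-independent (a sum)
  let leftover := (PySem.Set.ofList a).foldl
      (fun (acc : Int) c => acc - 2 * min ((a.count c : Int)) ((b.count c : Int)))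
      ((a.length : Int) + (b.length : Int))
  let flames := ["Friends", "Lovers", "Affection", "Marriage", "Enemies", "Siblings"]
  let pos := (PySem.List.pyRange 2 7 1).foldl (fun (pos : Int) n => PySem.Int.mod (pos + leftover) n) 0
  PySem.List.pyGetD flames pos ""

-- ===== PRECONDITION & SPEC =====
def Spec_calculate_flames (name1 : String) (name2 : String) (out : String) : Prop := out = calculate_flames_alt name1 name2
instance (name1 : String) (name2 : String) (out : String) : Decidable (Spec_calculate_flames name1 name2 out) := by unfold Spec_calculate_flames; infer_instance

-- ===== CLAIM (what is proved, stated in full; the proofs are below) =====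
def Claim_equal_calculate_flames : Prop := ∀ (name1 : String) (name2 : String), Dom_calculate_flames name1 name2 → Spec_calculate_flames name1 name2 (calculate_flames name1 name2)

-- ===== LEMMAS AND PROOFS =====

-- 'char in name2' for a single char is membership
theorem isIn_singleton (c : Char) (s : List Char) : PySem.Chars.isIn [c] s = s.contains c := by
  rcases h : s.contains c with _ | _
  · rw [PySem.Chars.isIn_eq_false_iff, List.singleton_infix_iff]; simpa using h
  · rw [PySem.Chars.isIn_iff_infix, List.singleton_infix_iff]; simpa using h

-- the elimination invariant: the remaining lengths are the initial lengths minus twice the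
-- min-of-counts sum, provided s1 still holds every char of the part of n1 left to process
theorem elim_lengths (cs : List Char) : ∀ (s1 s2 : List Char) (F : Finset Char),
    (∀ c, cs.count c ≤ s1.count c) → (∀ c ∈ cs, c ∈ F) →
    (((cs.foldl (fun (st : List Char × List Char) c =>
        if PySem.Chars.isIn [c] st.2 then (st.1.erase c, st.2.erase c) else st) (s1, s2)).1.length : Int)
      + ((cs.foldl (fun (st : List Char × List Char) c =>
        if PySem.Chars.isIn [c] st.2 then (st.1.erase c, st.2.erase c) else st) (s1, s2)).2.length : Int)
      = (s1.length : Int) + (s2.length : Int)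
        - 2 * ∑ c ∈ F, ((min (cs.count c) (s2.count c) : Nat) : Int)) := by
  induction cs with
  | nil =>
    intro s1 s2 F _ _
    simp
  | cons c cs ih =>
    intro s1 s2 F hcount hF
    have hcF : c ∈ F := hF c (by simp)
    rcases h2 : s2.contains c with _ | _
    · -- c not in s2: nothing removed, the c-term of the sum is unchanged
      have hIs : PySem.Chars.isIn [c] s2 = false := (isIn_singleton c s2).trans h2
      have hc2 : s2.count c = 0 := List.count_eq_zero.mpr (by simpa using h2)
      simp only [List.foldl_cons, hIs, Bool.false_eq_true, if_false]
      have hcount2 : ∀ d, cs.count d ≤ s1.count d := by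
        intro d
        have h := hcount d
        rcases eq_or_ne d c with rfl | hdc
        · rw [List.count_cons_self] at h; omega
        · simp only [List.count_cons, beq_iff_eq] at h
          omega
      rw [ih s1 s2 F hcount2 (fun d hd => hF d (by simp [hd]))]
      have hsum : ∀ d ∈ F, ((min ((c :: cs).count d) (s2.count d) : Nat) : Int)
          = ((min (cs.count d) (s2.count d) : Nat) : Int) := by
        intro d _
        rcases eq_or_ne d c with rfl | hdc
        · simp [List.count_cons_self, hc2]
        · simp [Ne.symm hdc]
      rw [Finset.sum_congr rfl hsum]
    · -- c in s2: one char removed from each side, the c-term of the sum drops by 1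
      have hIs : PySem.Chars.isIn [c] s2 = true := (isIn_singleton c s2).trans h2
      have hc2 : c ∈ s2 := by simpa using h2
      have hc2c : 1 ≤ s2.count c := List.one_le_count_iff.mpr hc2
      have hc1c : 1 ≤ s1.count c := by
        have h := hcount c
        rw [List.count_cons_self] at h
        omega
      have hc1 : c ∈ s1 := List.one_le_count_iff.mp hc1c
      simp only [List.foldl_cons, hIs, if_true]
      have hcount' : ∀ d, cs.count d ≤ (s1.erase c).count d := by
        intro d
        have h := hcount d
        rcases eq_or_ne d c with rfl | hdc
        · rw [List.count_erase_self]
          rw [List.count_cons_self] at h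
          omega
        · rw [List.count_erase_of_ne hdc]
          simp only [List.count_cons, beq_iff_eq] at h
          omega
      rw [ih (s1.erase c) (s2.erase c) F hcount' (fun d hd => hF d (by simp [hd]))]
      have hlen1 : ((s1.erase c).length : Int) = (s1.length : Int) - 1 := by
        rw [List.length_erase_of_mem hc1]
        have := List.length_pos_of_mem hc1
        omega
      have hlen2 : ((s2.erase c).length : Int) = (s2.length : Int) - 1 := by
        rw [List.length_erase_of_mem hc2]
        have := List.length_pos_of_mem hc2
        omega
      rw [hlen1, hlen2]
      have hsum : ∑ d ∈ F, ((min ((c :: cs).count d) (s2.count d) : Nat) : Int)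
          = 1 + ∑ d ∈ F, ((min (cs.count d) ((s2.erase c).count d) : Nat) : Int) := by
        rw [← Finset.add_sum_erase F _ hcF, ← Finset.add_sum_erase F _ hcF]
        have hterm : ((min ((c :: cs).count c) (s2.count c) : Nat) : Int)
            = 1 + ((min (cs.count c) ((s2.erase c).count c) : Nat) : Int) := by
          rw [List.count_erase_self, List.count_cons_self]
          push_cast; omega
        have hrest : ∀ d ∈ F.erase c, ((min ((c :: cs).count d) (s2.count d) : Nat) : Int)
            = ((min (cs.count d) ((s2.erase c).count d) : Nat) : Int) := by
          intro d hd
          have hdc : d ≠ c := Finset.ne_of_mem_erase hd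
          rw [List.count_erase_of_ne hdc]
          simp [Ne.symm hdc]
        rw [hterm, Finset.sum_congr rfl hrest]
        ring
      rw [hsum]
      ring

-- B's subtracting fold is the initial value minus the sum
theorem foldl_sub_sum (l : List Char) : ∀ (init : Int) (g : Char → Int),
    l.foldl (fun a c => a - g c) init = init - (l.map g).sum := by
  induction l with
  | nil => intro init g; simp
  | cons c cs ih => intro init g; simp [ih]; ring

theorem dedup_toFinset (l : List Char) : (PySem.List.dedup l).toFinset = l.toFinset := by
  ext c; simp

-- B's leftover equals A's combined length
theorem leftover_eq (n1 n2 : List Char) :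
    (PySem.Set.ofList n1).foldl
        (fun (acc : Int) c => acc - 2 * min ((n1.count c : Int)) ((n2.count c : Int)))
        ((n1.length : Int) + (n2.length : Int))
    = (((n1.foldl (fun (st : List Char × List Char) c =>
        if PySem.Chars.isIn [c] st.2 then (st.1.erase c, st.2.erase c) else st) (n1, n2)).1.length
      + (n1.foldl (fun (st : List Char × List Char) c =>
        if PySem.Chars.isIn [c] st.2 then (st.1.erase c, st.2.erase c) else st) (n1, n2)).2.length : Nat) : Int) := by
  have hA := elim_lengths n1 n1 n2 n1.toFinset (fun c => le_refl _) (fun c hc => List.mem_toFinset.mpr hc)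
  rw [← PySem.List.dedup_eq_ofList, foldl_sub_sum]
  have hsum : ((PySem.List.dedup n1).map (fun c => 2 * min ((n1.count c : Int)) ((n2.count c : Int)))).sum
      = 2 * ∑ c ∈ n1.toFinset, ((min (n1.count c) (n2.count c) : Nat) : Int) := by
    rw [← dedup_toFinset n1, ← List.sum_toFinset _ (PySem.List.nodup_dedup n1), Finset.mul_sum]
    apply Finset.sum_congr rfl
    intro c _
    push_cast
    ring
  rw [hsum]
  omega

-- one while-iteration removes exactly one element
theorem flamesStep_length (k : Nat) (fl : List String) (h : 1 < fl.length) :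
    (flamesStep k fl).length = fl.length - 1 := by
  unfold flamesStep
  by_cases h0 : (0 : Int) ≤ ((k % fl.length : Nat) : Int) - 1
  · have h1 : 1 ≤ k % fl.length := by omega
    have h2 : k % fl.length < fl.length := Nat.mod_lt _ (by omega)
    rw [if_pos h0]
    have e1 : ((k % fl.length : Nat) : Int) - 1 + 1 = ((k % fl.length : Nat) : Int) := by ring
    have e2 : ((k % fl.length : Nat) : Int) - 1 = (((k % fl.length - 1 : Nat)) : Int) := by omega
    rw [e1, e2, PySem.List.slice_from_natCast, PySem.List.slice_to_natCast]
    simp [List.length_take, List.length_drop]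
    omega
  · have h1 : k % fl.length = 0 := by omega
    rw [if_neg h0]
    have e : ((fl.length : Nat) : Int) - 1 = ((fl.length - 1 : Nat) : Int) := by omega
    rw [e, PySem.List.slice_to_natCast]
    simp [List.length_take]

-- the whole loop only reads k mod 60 (every live length 2..6 divides 60)
theorem flamesLoop_mod (fuel : Nat) : ∀ (fl : List String) (k : Nat), fl.length ≤ 6 →
    flamesLoop k fuel fl = flamesLoop (k % 60) fuel fl := by
  induction fuel with
  | zero => intro fl k _; rfl
  | succ fuel ih =>
    intro fl k hlen
    unfold flamesLoop
    by_cases h : fl.length > 1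
    · have hd : fl.length ∣ 60 := by
        have h5 : fl.length = 2 ∨ fl.length = 3 ∨ fl.length = 4 ∨ fl.length = 5 ∨ fl.length = 6 := by omega
        rcases h5 with h' | h' | h' | h' | h' <;> rw [h'] <;> decide
      have hstep : flamesStep k fl = flamesStep (k % 60) fl := by
        unfold flamesStep
        rw [Nat.mod_mod_of_dvd k hd]
      rw [if_pos h, if_pos h, hstep, ih _ _ (by rw [flamesStep_length _ _ h]; omega)]
    · rw [if_neg h, if_neg h]

-- B's recurrence on a Nat input computes a Nat expression
theorem posFold_natCast (K : Nat) :
    (PySem.List.pyRange 2 7 1).foldl (fun (pos : Int) n => PySem.Int.mod (pos + (K : Int)) n) 0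
    = ((((((((0 + K) % 2 + K) % 3 + K) % 4 + K) % 5 + K) % 6 : Nat)) : Int) := by
  have hr : PySem.List.pyRange 2 7 1 = [2, 3, 4, 5, 6] := by decide
  rw [hr]
  simp only [List.foldl_cons, List.foldl_nil]
  rw [PySem.Int.mod_eq_emod_of_pos (by norm_num), PySem.Int.mod_eq_emod_of_pos (by norm_num),
      PySem.Int.mod_eq_emod_of_pos (by norm_num), PySem.Int.mod_eq_emod_of_pos (by norm_num),
      PySem.Int.mod_eq_emod_of_pos (by norm_num)]
  push_cast [Int.natCast_mod]
  ring_nf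

-- B's recurrence also only reads K mod 60
theorem posNat_mod (K : Nat) :
    (((((0 + K) % 2 + K) % 3 + K) % 4 + K) % 5 + K) % 6
    = (((((0 + K % 60) % 2 + K % 60) % 3 + K % 60) % 4 + K % 60) % 5 + K % 60) % 6 := by
  have e2 : (0 + K) % 2 = (0 + K % 60) % 2 := by omega
  rw [e2]
  generalize (0 + K % 60) % 2 = a
  have e3 : (a + K) % 3 = (a + K % 60) % 3 := by omega
  rw [e3]
  generalize (a + K % 60) % 3 = b
  have e4 : (b + K) % 4 = (b + K % 60) % 4 := by omega
  rw [e4]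
  generalize (b + K % 60) % 4 = c
  have e5 : (c + K) % 5 = (c + K % 60) % 5 := by omega
  rw [e5]
  generalize (c + K % 60) % 5 = d
  omega

-- the survivor of A's elimination is the flames entry at B's recurrence index, for all 60 residues
theorem survivor_residues : ∀ r : Fin 60,
    PySem.List.pyGetD (flamesLoop r.val 6 ["Friends", "Lovers", "Affection", "Marriage", "Enemies", "Siblings"]) 0 ""
    = PySem.List.pyGetD ["Friends", "Lovers", "Affection", "Marriage", "Enemies", "Siblings"]
        (((((((((0 + r.val) % 2 + r.val) % 3 + r.val) % 4 + r.val) % 5 + r.val) % 6 : Nat)) : Int)) "" := by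
  decide

-- the two halves combined: for every combined length K the loop survivor is flames[posNat K]
theorem survivor_eq (K : Nat) :
    PySem.List.pyGetD (flamesLoop K 6 ["Friends", "Lovers", "Affection", "Marriage", "Enemies", "Siblings"]) 0 ""
    = PySem.List.pyGetD ["Friends", "Lovers", "Affection", "Marriage", "Enemies", "Siblings"]
        (((((((((0 + K) % 2 + K) % 3 + K) % 4 + K) % 5 + K) % 6 : Nat)) : Int)) "" := by
  have h1 := flamesLoop_mod 6 ["Friends", "Lovers", "Affection", "Marriage", "Enemies", "Siblings"] K (by decide)
  rw [h1, posNat_mod K]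
  have hK : K % 60 < 60 := Nat.mod_lt _ (by omega)
  exact survivor_residues ⟨K % 60, hK⟩

-- ===== VERDICT (by name: the statement is the Claim_ definition above) =====
theorem calculate_flames_spec : Claim_equal_calculate_flames := by
  intro name1 name2 _
  unfold Spec_calculate_flames calculate_flames calculate_flames_alt
  simp only []
  rw [leftover_eq, posFold_natCast]
  exact survivor_eq _
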